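-- pv_equiv track=rewrite | github.com/Dylan-Weber/advent-of-code-2020 | day6/day6.py | part2
-- ===== SOURCE A (Python) =====
-- def part2(inp):
--     count = 0
--     curr = None
--     for line in inp:
--         if line == '\n':
--             count += len(curr)
--             curr = None
--         elif curr is None:
--             curr = set(line[:-1])
--         else:
--             curr = curr.intersection(set(line[:-1]))
--     count += len(curr)
--     return count
-- ===== SOURCE B (Python) =====
-- def part2(inp):
--     # Two-phase: first partition lines into groups of per-line character sets,
--     # then sum the sizes of each group's batch intersection.
--     groups = []
--     curr = []
--     for line in inp:
--         if line == '\n':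
--             groups.append(curr)
--             curr = []
--         else:
--             curr.append(set(line[:-1]))
--     groups.append(curr)
--     return sum(len(set.intersection(*g)) for g in groups)
-- ===== Notes on version B (the rewrite author's own statement) =====
-- stated objective: alternative
-- what changed: A folds a running intersection inline with the line loop; B first materialises the groups as lists of per-line character sets in one pass, then reduces each group with a batch set.intersection(*g) and sums in a second pass.
-- outside the precondition, e.g. on part2([]): A raises TypeError, B raises TypeError; on part2(['a\n', '\n']): A raises TypeError, B raises TypeError
import Mathlib
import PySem

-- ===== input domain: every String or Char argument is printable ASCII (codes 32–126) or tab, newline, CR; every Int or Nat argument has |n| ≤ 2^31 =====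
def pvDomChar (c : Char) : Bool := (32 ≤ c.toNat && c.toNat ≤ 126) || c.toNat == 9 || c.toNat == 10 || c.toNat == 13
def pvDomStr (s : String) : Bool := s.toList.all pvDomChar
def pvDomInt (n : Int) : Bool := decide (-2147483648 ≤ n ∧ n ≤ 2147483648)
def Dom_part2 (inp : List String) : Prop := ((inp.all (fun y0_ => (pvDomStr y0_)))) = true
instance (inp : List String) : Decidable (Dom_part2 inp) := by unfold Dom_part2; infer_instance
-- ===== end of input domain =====

-- B restructures A's inline running-intersection fold into two phases: materialise the groups
-- as lists of per-line character sets, then reduce each group by a batch intersection and sum.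

-- shared helper: set(line[:-1])  (exact: Str.slice … (-1) is Python's line[:-1])
def pvLineSet (line : String) : PySem.Set Char :=
  PySem.Set.ofList (PySem.Str.slice line none (some (-1))).toList

-- ===== PORT A =====
-- A's loop body; curr = none models Python's None.  On the inputs Pre_part2 admits the
-- '.getD Set.empty' branch is never taken with none (there Python raises TypeError).
def part2Step (s : Int × Option (PySem.Set Char)) (line : String) :
    Int × Option (PySem.Set Char) :=
  if line = "\n" then
    (s.1 + PySem.Set.len (s.2.getD PySem.Set.empty), none)
  else
    match s.2 with
    | none => (s.1, some (pvLineSet line))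
    | some c => (s.1, some (PySem.Set.inter c (pvLineSet line)))

def part2 (inp : List String) : Int :=
  let r := inp.foldl part2Step (0, none)
  r.1 + PySem.Set.len (r.2.getD PySem.Set.empty)

-- ===== PORT B =====
-- phase 1: partition into groups of per-line sets
def part2AltStep (s : List (List (PySem.Set Char)) × List (PySem.Set Char)) (line : String) :
    List (List (PySem.Set Char)) × List (PySem.Set Char) :=
  if line = "\n" then (s.1 ++ [s.2], []) else (s.1, s.2 ++ [pvLineSet line])

-- phase 2 reducer: set.intersection(*g) (left-to-right; on [] Python raises TypeError,
-- which Pre_part2 excludes — the [] branch here is never reached under Pre_part2)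
def pvInterAll (g : List (PySem.Set Char)) : PySem.Set Char :=
  match g with
  | [] => PySem.Set.empty
  | h :: t => t.foldl PySem.Set.inter h

def part2_alt (inp : List String) : Int :=
  let r := inp.foldl part2AltStep ([], [])
  ((r.1 ++ [r.2]).map (fun g => PySem.Set.len (pvInterAll g))).sum

-- ===== PRECONDITION & SPEC =====
-- Pre_ excludes exactly the inputs on which A raises TypeError (len(None)): empty input,
-- a leading or trailing blank line, or two consecutive blank lines (an empty group).
-- B raises TypeError on the same inputs (set.intersection(*[])).
def Pre_part2 (inp : List String) : Prop :=
  inp ≠ [] ∧ inp.head? ≠ some "\n" ∧ inp.getLast? ≠ some "\n" ∧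
    ∀ p ∈ inp.zip inp.tail, ¬(p.1 = "\n" ∧ p.2 = "\n")
instance (inp : List String) : Decidable (Pre_part2 inp) := by unfold Pre_part2; infer_instance

def pvWitness_part2 : List String := ["ab\n", "b\n", "\n", "c\n"]

def Spec_part2 (inp : List String) (out : Int) : Prop := out = part2_alt inp
instance (inp : List String) (out : Int) : Decidable (Spec_part2 inp out) := by
  unfold Spec_part2; infer_instance

-- ===== CLAIM (what is proved, stated in full; the proofs are below) =====
def Claim_equal_part2 : Prop :=
  ∀ (inp : List String), Dom_part2 inp → Pre_part2 inp → Spec_part2 inp (part2 inp)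

-- ===== LEMMAS AND PROOFS =====

-- A's final "count += len(curr)" applied to a loop state
def pvFinishA (s : Int × Option (PySem.Set Char)) : Int :=
  s.1 + PySem.Set.len (s.2.getD PySem.Set.empty)

-- B's total over a list of groups
def pvSumLen (gs : List (List (PySem.Set Char))) : Int :=
  (gs.map (fun g => PySem.Set.len (pvInterAll g))).sum

lemma pvSumLen_append (xs ys : List (List (PySem.Set Char))) :
    pvSumLen (xs ++ ys) = pvSumLen xs + pvSumLen ys := by
  simp [pvSumLen]

-- the accumulated group list only collects on the left
lemma altStep_acc (inp : List String) :
    ∀ (gs : List (List (PySem.Set Char))) (cur : List (PySem.Set Char)),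
      inp.foldl part2AltStep (gs, cur) =
        (gs ++ (inp.foldl part2AltStep ([], cur)).1, (inp.foldl part2AltStep ([], cur)).2) := by
  induction inp with
  | nil => intro gs cur; simp
  | cons a l ih =>
    intro gs cur
    by_cases ha : a = "\n"
    · have e1 : ∀ gs' : List (List (PySem.Set Char)), part2AltStep (gs', cur) a = (gs' ++ [cur], []) := by
        intro gs'; simp [part2AltStep, ha]
      simp only [List.foldl_cons, e1, List.nil_append]
      rw [ih (gs ++ [cur]) [], ih [cur] []]
      simp
    · have e1 : ∀ gs' : List (List (PySem.Set Char)), part2AltStep (gs', cur) a = (gs', cur ++ [pvLineSet a]) := by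
        intro gs'; simp [part2AltStep, ha]
      simp only [List.foldl_cons, e1]
      exact ih gs (cur ++ [pvLineSet a])

lemma pvInterAll_concat (h : PySem.Set Char) (t : List (PySem.Set Char)) (x : PySem.Set Char) :
    pvInterAll ((h :: t) ++ [x]) = PySem.Set.inter (pvInterAll (h :: t)) x := by
  simp [pvInterAll]

-- the adjacency condition (no two consecutive blank lines) restricted to the tail
lemma pvAdj_tail {a : String} {l : List String} :
    (∀ p ∈ (a :: l).zip (a :: l).tail, ¬(p.1 = "\n" ∧ p.2 = "\n")) →
      ∀ p ∈ l.zip l.tail, ¬(p.1 = "\n" ∧ p.2 = "\n") := by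
  intro h p hp
  rcases l with _ | ⟨b, l2⟩
  · simp at hp
  · exact h p (by simp at hp ⊢; tauto)

-- the joint loop invariant: A's fold from state (c, some …)/(c, none) matches B's two phases
lemma pvMain (inp : List String) :
    (∀ (c : Int) (cur : List (PySem.Set Char)), cur ≠ [] →
        inp.getLast? ≠ some "\n" →
        (∀ p ∈ inp.zip inp.tail, ¬(p.1 = "\n" ∧ p.2 = "\n")) →
        pvFinishA (inp.foldl part2Step (c, some (pvInterAll cur))) =
          c + pvSumLen ((inp.foldl part2AltStep ([], cur)).1 ++
                [(inp.foldl part2AltStep ([], cur)).2]))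
    ∧ (∀ (c : Int), inp ≠ [] → inp.head? ≠ some "\n" →
        inp.getLast? ≠ some "\n" →
        (∀ p ∈ inp.zip inp.tail, ¬(p.1 = "\n" ∧ p.2 = "\n")) →
        pvFinishA (inp.foldl part2Step (c, none)) =
          c + pvSumLen ((inp.foldl part2AltStep ([], [])).1 ++
                [(inp.foldl part2AltStep ([], [])).2])) := by
  induction inp with
  | nil =>
    constructor
    · intro c cur _ _ _
      simp [pvFinishA, pvSumLen]
    · intro c h; exact absurd rfl h
  | cons a l ih =>
    obtain ⟨ihS, ihN⟩ := ih
    constructor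
    · -- some-state
      intro c cur hcur hlast2 hchain
      obtain ⟨h, tl, rfl⟩ := List.exists_cons_of_ne_nil hcur
      have hchain2 := pvAdj_tail hchain
      by_cases ha : a = "\n"
      · -- close the group
        have hlne : l ≠ [] := by
          intro hl; subst hl; simp [ha] at hlast2
        obtain ⟨b, l2, rfl⟩ := List.exists_cons_of_ne_nil hlne
        have hhead : (b :: l2).head? ≠ some "\n" := by
          have := hchain (a, b) (by simp)
          simp [ha] at this
          simpa using this
        have hlast3 : (b :: l2).getLast? ≠ some "\n" := by
          simpa using hlast2
        have eA : part2Step (c, some (pvInterAll (h :: tl))) a =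
            (c + PySem.Set.len (pvInterAll (h :: tl)), none) := by
          simp [part2Step, ha]
        have eB : part2AltStep (([] : List (List (PySem.Set Char))), h :: tl) a =
            ([h :: tl], []) := by
          simp [part2AltStep, ha]
        rw [show ((a :: b :: l2).foldl part2Step (c, some (pvInterAll (h :: tl)))) =
              ((b :: l2).foldl part2Step (c + PySem.Set.len (pvInterAll (h :: tl)), none)) from by
            rw [List.foldl_cons, eA],
          show ((a :: b :: l2).foldl part2AltStep (([] : List (List (PySem.Set Char))), h :: tl)) =
              ((b :: l2).foldl part2AltStep ([h :: tl], ([] : List (PySem.Set Char)))) from by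
            rw [List.foldl_cons, eB]]
        rw [ihN (c + PySem.Set.len (pvInterAll (h :: tl))) (by simp) hhead hlast3 hchain2]
        rw [altStep_acc (b :: l2) [h :: tl] []]
        rw [List.append_assoc, pvSumLen_append]
        simp [pvSumLen]
        ring
      · -- extend the group
        have hlast3 : l.getLast? ≠ some "\n" := by
          rcases l with _ | ⟨b, l2⟩
          · simp
          · simpa using hlast2
        have eA : part2Step (c, some (pvInterAll (h :: tl))) a =
            (c, some (PySem.Set.inter (pvInterAll (h :: tl)) (pvLineSet a))) := by
          simp [part2Step, ha]
        have eB : part2AltStep (([] : List (List (PySem.Set Char))), h :: tl) a =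
            ([], (h :: tl) ++ [pvLineSet a]) := by
          simp [part2AltStep, ha]
        simp only [List.foldl_cons, eA, eB]
        rw [← pvInterAll_concat h tl (pvLineSet a)]
        exact ihS c ((h :: tl) ++ [pvLineSet a]) (by simp) hlast3 hchain2
    · -- none-state
      intro c hne hhead hlast2 hchain
      have ha : a ≠ "\n" := by simpa using hhead
      have hchain2 := pvAdj_tail hchain
      have hlast3 : l.getLast? ≠ some "\n" := by
        rcases l with _ | ⟨b, l2⟩
        · simp
        · simpa using hlast2
      have eA : part2Step (c, none) a = (c, some (pvLineSet a)) := by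
        simp [part2Step, ha]
      have eB : part2AltStep (([] : List (List (PySem.Set Char))), ([] : List (PySem.Set Char))) a =
          ([], [pvLineSet a]) := by
        simp [part2AltStep, ha]
      simp only [List.foldl_cons, eA, eB]
      have hx : pvLineSet a = pvInterAll [pvLineSet a] := by simp [pvInterAll]
      rw [hx]
      exact ihS c [pvLineSet a] (by simp) hlast3 hchain2

-- ===== VERDICT (by name: the statement is the Claim_ definition above) =====
theorem part2_spec : Claim_equal_part2 := by
  unfold Claim_equal_part2
  intro inp _ hpre
  obtain ⟨hne, hhead, hlast, hchain⟩ := hpre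
  unfold Spec_part2 part2 part2_alt
  have := (pvMain inp).2 0 hne hhead hlast hchain
  simpa [pvFinishA, pvSumLen] using this
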